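-- pv_equiv track=rewrite | github.com/SauravSinha76/scaler2 | class57/N_integer.py | solve
-- ===== SOURCE A (Python) =====
-- from collections import deque
--
-- def solve(A):
--     queue = deque()
--     queue.append(1)
--     queue.append(2)
--     queue.append(3)
--     ans =[]
--     for i in range(3,A,3):
--         x = queue.popleft()
--         ans.append(x)
--         queue.append(10 *x +1)
--         queue.append(10* x+ 2)
--         queue.append(10* x+3)
--     for a in queue:
--         ans.append(a)
--
--     return ans
-- ===== SOURCE B (Python) =====
-- def solve(A):
--     # count of outputs: 3 seeds + 3 per loop iteration of A
--     n = 3 + 3 * max(0, (A - 1) // 3)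
--     ans = []
--     for k in range(1, n + 1):
--         # bijective base-3 digits of k, least significant first
--         digits = []
--         while k:
--             k, r = divmod(k - 1, 3)
--             digits.append(r + 1)
--         x = 0
--         for d in reversed(digits):
--             x = 10 * x + d
--         ans.append(x)
--     return ans
-- ===== Notes on version B (the rewrite author's own statement) =====
-- stated objective: alternative
-- what changed: Replaces A's deque BFS (pop a number, enqueue its three children) by computing the output count in closed form and converting each output rank directly to its bijective base-3 numeral over the allowed digit set.
import Mathlib
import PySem

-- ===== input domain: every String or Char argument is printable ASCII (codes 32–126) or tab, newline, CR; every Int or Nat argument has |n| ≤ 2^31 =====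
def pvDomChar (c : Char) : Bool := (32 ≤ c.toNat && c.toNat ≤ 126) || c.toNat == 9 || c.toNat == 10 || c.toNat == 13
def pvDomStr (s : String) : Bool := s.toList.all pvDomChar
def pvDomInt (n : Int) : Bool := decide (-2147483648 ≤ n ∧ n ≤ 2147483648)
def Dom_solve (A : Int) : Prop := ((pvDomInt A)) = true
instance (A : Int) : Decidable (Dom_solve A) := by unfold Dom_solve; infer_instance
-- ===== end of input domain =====

-- B replaces A's deque BFS by a closed-form count plus a direct rank-to-value
-- bijective-base-3 conversion (objective: alternative algorithm, same output).

-- ===== PORT A =====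
-- one iteration of A's loop body: popleft, record it, enqueue its three children
-- (the [] branch is a totality guard only; the queue is never empty in A's run)
def solveStep (st : List Int × List Int) : List Int × List Int :=
  match st with
  | (x :: rest, ans) => (rest ++ [10 * x + 1, 10 * x + 2, 10 * x + 3], ans ++ [x])
  | ([], ans) => ([], ans)

def solve (A : Int) : List Int :=
  let st := (PySem.List.pyRange 3 A 3).foldl (fun st _ => solveStep st) ([1, 2, 3], [])
  st.2 ++ st.1

-- ===== PORT B =====
-- bijective base-three digits of k (each digit between one and three), least significant first:
-- the 'while k: k, r = divmod(k - 1, 3); digits.append(r + 1)' loop of Source B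
def bijDigits : Nat → List Int
  | 0 => []
  | k + 1 => ((k % 3 : Nat) + 1 : Int) :: bijDigits (k / 3)
  decreasing_by exact Nat.lt_succ_of_le (Nat.div_le_self k 3)

def solve_alt (A : Int) : List Int :=
  let n : Int := 3 + 3 * max 0 (PySem.Int.floordiv (A - 1) 3)
  (PySem.List.pyRange 1 (n + 1) 1).map (fun k =>
    (bijDigits k.toNat).reverse.foldl (fun x d => 10 * x + d) 0)

-- ===== PRECONDITION & SPEC =====
def Spec_solve (A : Int) (out : List Int) : Prop := out = solve_alt A
instance (A : Int) (out : List Int) : Decidable (Spec_solve A out) := by unfold Spec_solve; infer_instance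

-- ===== CLAIM (what is proved, stated in full; the proofs are below) =====
def Claim_equal_solve : Prop := ∀ (A : Int), Dom_solve A → Spec_solve A (solve A)

-- ===== LEMMAS AND PROOFS =====

-- value of rank k in the ascending sequence of numbers whose digits all lie in {1..3}
def g (k : Nat) : Int := (bijDigits k).reverse.foldl (fun x d => 10 * x + d) 0

lemma g_child (k d : Nat) (h1 : 1 ≤ d) (h2 : d ≤ 3) :
    g (3 * k + d) = 10 * g k + (d : Int) := by
  have hk : 3 * k + d = (3 * k + (d - 1)) + 1 := by omega
  have hmod : (3 * k + (d - 1)) % 3 = d - 1 := by omega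
  have hdiv : (3 * k + (d - 1)) / 3 = k := by omega
  have hdig : bijDigits (3 * k + d) = (d : Int) :: bijDigits k := by
    rw [hk, bijDigits, hmod, hdiv]
    congr 1
    omega
  simp [g, hdig, List.foldl_append]

lemma foldl_const_solveStep (l : List Int) (st : List Int × List Int) :
    l.foldl (fun st _ => solveStep st) st = solveStep^[l.length] st := by
  induction l generalizing st with
  | nil => rfl
  | cons x xs ih => simp [List.foldl_cons, ih, Function.iterate_succ_apply]

lemma iterA (t : Nat) :
    solveStep^[t] (([1, 2, 3] : List Int), ([] : List Int))
      = ((List.range' (t + 1) (2 * t + 3)).map g, (List.range' 1 t).map g) := by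
  induction t with
  | zero =>
      have h1 : g 1 = 1 := by simp [g, bijDigits]
      have h2 : g 2 = 2 := by simp [g, bijDigits]
      have h3 : g 3 = 3 := by simp [g, bijDigits]
      simp [List.range', h1, h2, h3]
  | succ t ih =>
      rw [Function.iterate_succ_apply', ih]
      have hq : List.range' (t + 1) (2 * t + 3) = (t + 1) :: List.range' (t + 2) (2 * t + 2) := by
        simp [List.range']
      have hsplit : List.range' (t + 2) (2 * t + 2) ++ List.range' (3 * t + 4) 3
          = List.range' (t + 2) (2 * t + 5) := by
        have h := List.range'_append (s := t + 2) (m := 2 * t + 2) (n := 3) (step := 1)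
        rw [show t + 2 + 1 * (2 * t + 2) = 3 * t + 4 from by ring,
            show 2 * t + 2 + 3 = 2 * t + 5 from by ring] at h
        exact h
      have h1 : 10 * g (t + 1) + 1 = g (3 * t + 4) := by
        have := g_child (t + 1) 1 (by omega) (by omega)
        rw [show 3 * (t + 1) + 1 = 3 * t + 4 from by omega] at this
        simp [this]
      have h2 : 10 * g (t + 1) + 2 = g (3 * t + 5) := by
        have := g_child (t + 1) 2 (by omega) (by omega)
        rw [show 3 * (t + 1) + 2 = 3 * t + 5 from by omega] at this
        simp [this]
      have h3 : 10 * g (t + 1) + 3 = g (3 * t + 6) := by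
        have := g_child (t + 1) 3 (by omega) (by omega)
        rw [show 3 * (t + 1) + 3 = 3 * t + 6 from by omega] at this
        simp [this]
      have hans : (List.range' 1 t).map g ++ [g (t + 1)] = (List.range' 1 (t + 1)).map g := by
        rw [List.range'_1_concat]
        simp [Nat.add_comm]
      rw [hq]
      simp only [List.map_cons, solveStep]
      rw [Prod.mk.injEq]
      refine ⟨?_, ?_⟩
      · rw [h1, h2, h3,
          show ([g (3 * t + 4), g (3 * t + 5), g (3 * t + 6)]
            = (List.range' (3 * t + 4) 3).map g) from by simp [List.range'],
          ← List.map_append, hsplit,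
          show t + 1 + 1 = t + 2 from by omega,
          show 2 * (t + 1) + 3 = 2 * t + 5 from by omega]
      · rw [hans]

-- A's result is the first 3m+3 ranks, m = number of loop iterations
lemma solve_eq_ranks (A : Int) :
    solve A = (List.range' 1 (3 * (PySem.List.pyRange 3 A 3).length + 3)).map g := by
  unfold solve
  rw [foldl_const_solveStep, iterA]
  set m := (PySem.List.pyRange 3 A 3).length with hm
  have h := List.range'_append_1 (s := 1) (m := m) (n := 2 * m + 3)
  rw [show 1 + m = m + 1 from by omega] at h
  calc (List.range' 1 m).map g ++ (List.range' (m + 1) (2 * m + 3)).map g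
      = (List.range' 1 m ++ List.range' (m + 1) (2 * m + 3)).map g := by
        rw [List.map_append]
    _ = (List.range' 1 (m + (2 * m + 3))).map g := by rw [h]
    _ = _ := by rw [show m + (2 * m + 3) = 3 * m + 3 from by omega]

lemma count_eq (A : Int) :
    (3 + 3 * max 0 (PySem.Int.floordiv (A - 1) 3)).toNat
      = 3 * (PySem.List.pyRange 3 A 3).length + 3 := by
  rw [PySem.List.pyRange_of_pos 3 A (by norm_num)]
  simp only [List.length_map, List.length_range]
  unfold PySem.Int.floordiv
  rw [Int.fdiv_eq_ediv]
  split_ifs with h <;> omega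

-- ===== VERDICT (by name: the statement is the Claim_ definition above) =====
theorem solve_spec : Claim_equal_solve := by
  intro A _
  unfold Spec_solve
  show solve A = (PySem.List.pyRange 1 ((3 + 3 * max 0 (PySem.Int.floordiv (A - 1) 3)) + 1) 1).map
      (fun k => (bijDigits k.toNat).reverse.foldl (fun x d => 10 * x + d) 0)
  rw [solve_eq_ranks, PySem.List.pyRange_one, List.map_map,
      show (3 + 3 * max 0 (PySem.Int.floordiv (A - 1) 3) + 1 - 1)
        = 3 + 3 * max 0 (PySem.Int.floordiv (A - 1) 3) from by ring,
      count_eq A, List.range'_eq_map_range, List.map_map]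
  apply List.map_congr_left
  intro k _
  simp only [Function.comp]
  have hk : ((1 : Int) + (k : Int)).toNat = 1 + k := by omega
  rw [hk]
  rfl
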